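-- pv_equiv track=rewrite | github.com/ZzKokonutzZ/prepa | PSIe/info/TP dynamique.py | reconstruction_chemin
-- ===== SOURCE A (Python) =====
-- def construire_tableaux(M) :
--     n=len(M)
--     p=len(M[0])
--     tabCout=[[None]*p for _ in range(n)]
--     tabChoix=[[None]*p for _ in range(n)]
--     for i in range(1,n+1) :
--         for j in range(1,p+1) :
--             if (i,j)==(1,1) :
--                 tabCout[n-i][p-j]=M[n-i][p-j]
--             elif i==1 :
--                 tabCout[n-i][p-j]=M[n-i][p-j]+tabCout[n-i][p-j+1]
--                 tabChoix[n-i][p-j]='>'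
--             elif j==1 :
--                 tabCout[n-i][p-j]=M[n-i][p-j]+tabCout[n-i+1][p-j]
--                 tabChoix[n-i][p-j]='V'
--             else :
--                 a=tabCout[n-i+1][p-j]
--                 b=tabCout[n-i][p-j+1]
--                 tabCout[n-i][p-j]=M[n-i][p-j]+min(a,b)
--                 tabChoix[n-i][p-j]='>'*(a>=b)+'V'*(a<b)
--     return (tabCout[0][0],tabCout,tabChoix)
--
-- def reconstruction_chemin(M) :
--     n,p=len(M),len(M[0])
--     _,tabCout,tabChoix=construire_tableaux(M)
--     l=[]
--     i=j=0
--     while tabChoix[i][j]!=None :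
--         l.append((i,j))
--         if tabChoix[i][j]=='>' :
--             j+=1
--         else :
--             i+=1
--     l.append((n-1,p-1))
--     return l
-- ===== SOURCE B (Python) =====
-- def reconstruction_chemin(M):
--     # Rolling single column of (cost-to-goal, shared linked path) pairs, columns
--     # right-to-left: the path is built during the DP itself (structure-shared
--     # cons cells), so there is no choice table and no reconstruction walk.
--     n, p = len(M), len(M[0])
--     col = None
--     for j in range(p - 1, -1, -1):
--         prev = col            # column j+1 (None for the last column)
--         col = [None] * n
--         for i in range(n - 1, -1, -1):
--             v = M[i][j]
--             if prev is None:
--                 if i == n - 1: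
--                     col[i] = (v, ((i, j), None))
--                 else:                         # last column: forced down
--                     c, node = col[i + 1]
--                     col[i] = (v + c, ((i, j), node))
--             elif i == n - 1:                  # bottom row: forced right
--                 c, node = prev[i]
--                 col[i] = (v + c, ((i, j), node))
--             else:
--                 cd, nd = col[i + 1]           # down
--                 cr, nr = prev[i]              # right
--                 if cd >= cr:                  # tie goes right, as in A
--                     col[i] = (v + cr, ((i, j), nr))
--                 else:
--                     col[i] = (v + cd, ((i, j), nd))
--     node = col[0][1]
--     out = []
--     while node is not None:
--         out.append(node[0])
--         node = node[1]
--     return out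
-- ===== Notes on version B (the rewrite author's own statement) =====
-- stated objective: alternative
-- what changed: B replaces A's two full 2D tables plus greedy reconstruction walk by a single rolling column of (cost-to-goal, structure-shared linked path) pairs swept right-to-left: the path is assembled inside the DP itself (cons cells shared between cells), so there is no choice table and no reconstruction pass at all, only a final O(n+p) flattening of the linked list at (0,0).
import Mathlib
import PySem

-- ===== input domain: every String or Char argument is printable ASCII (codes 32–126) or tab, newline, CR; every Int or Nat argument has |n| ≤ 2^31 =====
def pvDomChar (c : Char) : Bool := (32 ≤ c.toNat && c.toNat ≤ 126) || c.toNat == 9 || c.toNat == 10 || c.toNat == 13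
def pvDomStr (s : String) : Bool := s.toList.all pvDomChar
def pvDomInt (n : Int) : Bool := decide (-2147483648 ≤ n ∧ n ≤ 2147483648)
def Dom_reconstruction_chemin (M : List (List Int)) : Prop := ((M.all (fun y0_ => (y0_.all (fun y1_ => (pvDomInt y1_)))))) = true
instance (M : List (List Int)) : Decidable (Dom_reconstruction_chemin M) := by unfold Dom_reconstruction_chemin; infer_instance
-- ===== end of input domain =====

-- B replaces A's two 2D tables plus reconstruction walk by a single rolling column of
-- (cost-to-goal, structure-shared linked path) pairs swept right-to-left; the path is
-- assembled inside the DP itself and only flattened at the end (objective: alternative).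

-- ===== PORT A =====
-- Python tab[r][c] read / write; indices are always in range on inputs satisfying Pre_.
def pvGet2 {α : Type} (t : List (List α)) (r c : Nat) (d : α) : α := (t.getD r []).getD c d
def pvSet2 {α : Type} (t : List (List α)) (r c : Nat) (v : α) : List (List α) :=
  t.set r ((t.getD r []).set c v)
-- read of a cost cell as an int (within Pre_ the cell read is always already filled)
def pvGetC (t : List (List (Option Int))) (r c : Nat) : Int := (pvGet2 t r c none).getD 0

-- loop body of construire_tableaux, for Nat loop counters i ∈ [1,n], j ∈ [1,p]
def pvFillCell (M : List (List Int)) (n p : Nat)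
    (st : List (List (Option Int)) × List (List (Option String))) (i j : Nat) :
    List (List (Option Int)) × List (List (Option String)) :=
  let cout := st.1
  let choix := st.2
  let m := (M.getD (n-i) []).getD (p-j) 0
  if i = 1 ∧ j = 1 then
    (pvSet2 cout (n-i) (p-j) (some m), choix)
  else if i = 1 then
    (pvSet2 cout (n-i) (p-j) (some (m + pvGetC cout (n-i) (p-j+1))),
     pvSet2 choix (n-i) (p-j) (some ">"))
  else if j = 1 then
    (pvSet2 cout (n-i) (p-j) (some (m + pvGetC cout (n-i+1) (p-j))),
     pvSet2 choix (n-i) (p-j) (some "V"))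
  else
    let a := pvGetC cout (n-i+1) (p-j)
    let b := pvGetC cout (n-i) (p-j+1)
    (pvSet2 cout (n-i) (p-j) (some (m + min a b)),
     pvSet2 choix (n-i) (p-j) (some ((if a ≥ b then ">" else "") ++ (if a < b then "V" else ""))))

-- range(1, n+1) is ported as (List.range n).map (· + 1) (both enumerate 1 .. n)
def construire_tableaux (M : List (List Int)) :
    Option Int × List (List (Option Int)) × List (List (Option String)) :=
  let n := M.length
  let p := (M.getD 0 []).length
  let st := ((List.range n).map (· + 1)).foldl
    (fun st i => ((List.range p).map (· + 1)).foldl (fun st j => pvFillCell M n p st i j) st)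
    (List.replicate n (List.replicate p (none : Option Int)),
     List.replicate n (List.replicate p (none : Option String)))
  (pvGet2 st.1 0 0 none, st.1, st.2)

-- the while loop of reconstruction_chemin; fuel n+p always suffices (i+j grows each step)
def pvWalkA (choix : List (List (Option String))) : Nat → Nat → Nat → List (Int × Int)
  | 0, _, _ => []
  | f+1, i, j =>
    match pvGet2 choix i j none with
    | none => []
    | some c =>
      ((i : Int), (j : Int)) ::
        (if c = ">" then pvWalkA choix f i (j+1) else pvWalkA choix f (i+1) j)

def reconstruction_chemin (M : List (List Int)) : List (Int × Int) :=
  let n := M.length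
  let p := (M.getD 0 []).length
  let t := construire_tableaux M
  pvWalkA t.2.2 (n + p) 0 0 ++ [((n : Int) - 1, (p : Int) - 1)]

-- ===== PORT B =====
-- inner loop of Source B (rows i = n-1 .. 0 of column j): argument k counts the rows already
-- filled from the bottom, so the result lists the entries for rows n-k .. n-1, head first;
-- Python's col[i+1] read is the head of the already-built rest, prev[i] is pr.getD i
def pvColB (M : List (List Int)) (n p j : Nat)
    (prev : Option (List (Int × List (Int × Int)))) : Nat → List (Int × List (Int × Int))
  | 0 => []
  | k+1 =>
    let rest := pvColB M n p j prev k
    let i := n - (k+1)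
    let v := (M.getD i []).getD j 0
    match prev, rest with
    | none, [] => [(v, [((i : Int), (j : Int))])]
    | none, (c, node) :: _ => (v + c, ((i : Int), (j : Int)) :: node) :: rest
    | some pr, [] =>
        let e := pr.getD i (0, [])
        [(v + e.1, ((i : Int), (j : Int)) :: e.2)]
    | some pr, (cd, nd) :: _ =>
        let e := pr.getD i (0, [])
        if cd ≥ e.1 then (v + e.1, ((i : Int), (j : Int)) :: e.2) :: rest
        else (v + cd, ((i : Int), (j : Int)) :: nd) :: rest

-- Source B's final while loop flattening the linked path (cons cells are Lean list conses)
def pvFlatten : List (Int × Int) → List (Int × Int)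
  | [] => []
  | x :: r => x :: pvFlatten r

-- range(p-1, -1, -1) is ported as (List.range p).reverse (both enumerate p-1 .. 0)
def reconstruction_chemin_alt (M : List (List Int)) : List (Int × Int) :=
  let n := M.length
  let p := (M.getD 0 []).length
  let col := ((List.range p).reverse).foldl
    (fun prev j => some (pvColB M n p j prev n))
    (none : Option (List (Int × List (Int × Int))))
  pvFlatten ((col.getD []).getD 0 (0, [])).2

-- ===== PRECONDITION & SPEC =====
-- Pre_ excludes exactly the inputs on which A raises (IndexError): empty M, empty first
-- row, or a row shorter than the first row.
def Pre_reconstruction_chemin (M : List (List Int)) : Prop :=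
  M ≠ [] ∧ (M.getD 0 []).length ≠ 0 ∧ ∀ row ∈ M, (M.getD 0 []).length ≤ row.length
instance (M : List (List Int)) : Decidable (Pre_reconstruction_chemin M) := by
  unfold Pre_reconstruction_chemin; infer_instance

def pvWitness_reconstruction_chemin : List (List Int) := [[1, 2, 3], [4, 5, 6], [7, 8, 9]]

def Spec_reconstruction_chemin (M : List (List Int)) (out : List (Int × Int)) : Prop :=
  out = reconstruction_chemin_alt M
instance (M : List (List Int)) (out : List (Int × Int)) : Decidable (Spec_reconstruction_chemin M out) := by
  unfold Spec_reconstruction_chemin; infer_instance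

-- ===== CLAIM (what is proved, stated in full; the proofs are below) =====
def Claim_equal_reconstruction_chemin : Prop :=
  ∀ (M : List (List Int)), Dom_reconstruction_chemin M → Pre_reconstruction_chemin M →
    Spec_reconstruction_chemin M (reconstruction_chemin M)

-- ===== LEMMAS AND PROOFS =====

-- the common mathematical cost-to-goal function both programs compute
def pvC (M : List (List Int)) (n p i j : Nat) : Int :=
  let v := (M.getD i []).getD j 0
  if h1 : i + 1 < n then
    if h2 : j + 1 < p then v + min (pvC M n p (i+1) j) (pvC M n p i (j+1))
    else v + pvC M n p (i+1) j
  else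
    if h2 : j + 1 < p then v + pvC M n p i (j+1)
    else v
termination_by (n - i) + (p - j)
decreasing_by all_goals omega

-- the common path from (i,j) to the goal, with A's tie rule (down ≥ right → right)
def pvPath (M : List (List Int)) (n p i j : Nat) : List (Int × Int) :=
  ((i : Int), (j : Int)) ::
    (if h1 : i + 1 < n then
       if h2 : j + 1 < p then
         if pvC M n p (i+1) j ≥ pvC M n p i (j+1) then pvPath M n p i (j+1)
         else pvPath M n p (i+1) j
       else pvPath M n p (i+1) j
     else if h2 : j + 1 < p then pvPath M n p i (j+1) else [])
termination_by (n - i) + (p - j)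
decreasing_by all_goals omega

-- what A's choice table holds at each cell
def pvChoixSpec (M : List (List Int)) (n p r c : Nat) : Option String :=
  if r = n-1 ∧ c = p-1 then none
  else if r = n-1 then some ">"
  else if c = p-1 then some "V"
  else if pvC M n p (r+1) c ≥ pvC M n p r (c+1) then some ">" else some "V"

-- the entry B's column holds for cell (i,j)
def pvEnt (M : List (List Int)) (n p i j : Nat) : Int × List (Int × Int) :=
  (pvC M n p i j, pvPath M n p i j)

theorem pvC_base (M : List (List Int)) (n p i j : Nat) (h1 : ¬ i + 1 < n) (h2 : ¬ j + 1 < p) :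
    pvC M n p i j = (M.getD i []).getD j 0 := by
  conv_lhs => rw [pvC.eq_def]
  rw [dif_neg h1, dif_neg h2]

theorem pvC_right (M : List (List Int)) (n p i j : Nat) (h1 : ¬ i + 1 < n) (h2 : j + 1 < p) :
    pvC M n p i j = (M.getD i []).getD j 0 + pvC M n p i (j+1) := by
  conv_lhs => rw [pvC.eq_def]
  rw [dif_neg h1, dif_pos h2]

theorem pvC_down (M : List (List Int)) (n p i j : Nat) (h1 : i + 1 < n) (h2 : ¬ j + 1 < p) :
    pvC M n p i j = (M.getD i []).getD j 0 + pvC M n p (i+1) j := by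
  conv_lhs => rw [pvC.eq_def]
  rw [dif_pos h1, dif_neg h2]

theorem pvC_min (M : List (List Int)) (n p i j : Nat) (h1 : i + 1 < n) (h2 : j + 1 < p) :
    pvC M n p i j = (M.getD i []).getD j 0 + min (pvC M n p (i+1) j) (pvC M n p i (j+1)) := by
  conv_lhs => rw [pvC.eq_def]
  rw [dif_pos h1, dif_pos h2]

theorem pvPath_base (M : List (List Int)) (n p i j : Nat) (h1 : ¬ i + 1 < n) (h2 : ¬ j + 1 < p) :
    pvPath M n p i j = [((i : Int), (j : Int))] := by
  conv_lhs => rw [pvPath.eq_def]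
  rw [dif_neg h1, dif_neg h2]

theorem pvPath_rightF (M : List (List Int)) (n p i j : Nat) (h1 : ¬ i + 1 < n) (h2 : j + 1 < p) :
    pvPath M n p i j = ((i : Int), (j : Int)) :: pvPath M n p i (j+1) := by
  conv_lhs => rw [pvPath.eq_def]
  rw [dif_neg h1, dif_pos h2]

theorem pvPath_downF (M : List (List Int)) (n p i j : Nat) (h1 : i + 1 < n) (h2 : ¬ j + 1 < p) :
    pvPath M n p i j = ((i : Int), (j : Int)) :: pvPath M n p (i+1) j := by
  conv_lhs => rw [pvPath.eq_def]
  rw [dif_pos h1, dif_neg h2]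

theorem pvPath_cmp (M : List (List Int)) (n p i j : Nat) (h1 : i + 1 < n) (h2 : j + 1 < p) :
    pvPath M n p i j = ((i : Int), (j : Int)) ::
      (if pvC M n p (i+1) j ≥ pvC M n p i (j+1) then pvPath M n p i (j+1)
       else pvPath M n p (i+1) j) := by
  conv_lhs => rw [pvPath.eq_def]
  rw [dif_pos h1, dif_pos h2]

-- basic 2D table lemmas ------------------------------------------------------

theorem pvGetD_set_self {α : Type} (t : List α) (r : Nat) (x d : α) (hr : r < t.length) :
    (t.set r x).getD r d = x := by
  rw [List.getD_eq_getElem?_getD, List.getElem?_set_self]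
  rfl
  exact hr

theorem pvGetD_set_ne {α : Type} (t : List α) (r r' : Nat) (x d : α) (h : r ≠ r') :
    (t.set r x).getD r' d = t.getD r' d := by
  rw [List.getD_eq_getElem?_getD, List.getElem?_set_ne h, ← List.getD_eq_getElem?_getD]

theorem pvSet2_length {α : Type} (t : List (List α)) (r c : Nat) (v : α) :
    (pvSet2 t r c v).length = t.length := by
  simp [pvSet2]

theorem pvSet2_row_length {α : Type} (t : List (List α)) (r c r' : Nat) (v : α) :
    ((pvSet2 t r c v).getD r' []).length = (t.getD r' []).length := by
  unfold pvSet2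
  by_cases h : r = r'
  · subst h
    by_cases hr : r < t.length
    · rw [pvGetD_set_self _ _ _ _ hr]
      simp
    · rw [List.set_eq_of_length_le (by omega)]
  · rw [pvGetD_set_ne _ _ _ _ _ h]

theorem pvGet2_set2_same {α : Type} (t : List (List α)) (r c : Nat) (v d : α)
    (hr : r < t.length) (hc : c < (t.getD r []).length) :
    pvGet2 (pvSet2 t r c v) r c d = v := by
  unfold pvGet2 pvSet2
  rw [pvGetD_set_self _ _ _ _ hr, pvGetD_set_self _ _ _ _ hc]

theorem pvGet2_set2_ne {α : Type} (t : List (List α)) (r c r' c' : Nat) (v d : α)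
    (h : r ≠ r' ∨ c ≠ c') :
    pvGet2 (pvSet2 t r c v) r' c' d = pvGet2 t r' c' d := by
  unfold pvGet2 pvSet2
  by_cases hr : r = r'
  · subst hr
    have hc : c ≠ c' := by tauto
    by_cases hlen : r < t.length
    · rw [pvGetD_set_self _ _ _ _ hlen, pvGetD_set_ne _ _ _ _ _ hc]
    · rw [List.set_eq_of_length_le (by omega)]
  · rw [pvGetD_set_ne _ _ _ _ _ hr]

-- the invariant carried through A's fill -------------------------------------

def pvInvC (M : List (List Int)) (n p : Nat) (P : Nat → Nat → Bool)
    (st : List (List (Option Int)) × List (List (Option String))) : Prop :=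
  st.1.length = n ∧ st.2.length = n ∧
  (∀ r, r < n → (st.1.getD r []).length = p ∧ (st.2.getD r []).length = p) ∧
  (∀ r c, r < n → c < p →
    pvGet2 st.1 r c none = (if P r c then some (pvC M n p r c) else none)) ∧
  (∀ r c, r < n → c < p →
    pvGet2 st.2 r c none = (if P r c then pvChoixSpec M n p r c else none))

def pvP (n p I J : Nat) (r c : Nat) : Bool := decide (n - I < r) || (decide (r = n - I) && decide (p - J ≤ c))

theorem pvInvC_congr (M : List (List Int)) (n p : Nat) (P P' : Nat → Nat → Bool) (st)
    (h : ∀ r c, r < n → c < p → P r c = P' r c) (hi : pvInvC M n p P st) :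
    pvInvC M n p P' st := by
  obtain ⟨h1, h2, h3, h4, h5⟩ := hi
  refine ⟨h1, h2, h3, ?_, ?_⟩
  · intro r c hr hc
    rw [h4 r c hr hc, h r c hr hc]
  · intro r c hr hc
    rw [h5 r c hr hc, h r c hr hc]

theorem pvFill_write (M : List (List Int)) (n p I J : Nat)
    (hI1 : 1 ≤ I) (hIn : I ≤ n) (hJ : J < p)
    (cout : List (List (Option Int))) (choix choix' : List (List (Option String)))
    (h : pvInvC M n p (pvP n p I J) (cout, choix))
    (hxlen : choix'.length = n)
    (hxrow : ∀ r, r < n → (choix'.getD r []).length = p)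
    (hxget : ∀ r c, r < n → c < p → pvGet2 choix' r c none =
        (if r = n - I ∧ c = p - (J+1) then pvChoixSpec M n p (n-I) (p-(J+1))
         else pvGet2 choix r c none)) :
    pvInvC M n p (pvP n p I (J+1))
      (pvSet2 cout (n-I) (p-(J+1)) (some (pvC M n p (n-I) (p-(J+1)))), choix') := by
  obtain ⟨h1, h2, h3, h4, h5⟩ := h
  dsimp only at h1 h2 h3 h4 h5
  have hr0 : n - I < n := by omega
  have hc0 : p - (J+1) < p := by omega
  have hPtrue : pvP n p I (J+1) (n-I) (p-(J+1)) = true := by simp [pvP]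
  have hPnew : ∀ r c, r < n → c < p → ¬(r = n-I ∧ c = p-(J+1)) →
      pvP n p I (J+1) r c = pvP n p I J r c := by
    intro r c hr hc hne
    simp only [pvP, ← Bool.decide_and, ← Bool.decide_or]
    exact decide_eq_decide.mpr (by omega)
  refine ⟨by rw [pvSet2_length]; exact h1, hxlen, ?_, ?_, ?_⟩
  · intro r hr
    exact ⟨by rw [pvSet2_row_length]; exact (h3 r hr).1, hxrow r hr⟩
  · intro r c hr hc
    by_cases hne : r = n-I ∧ c = p-(J+1)
    · obtain ⟨e1, e2⟩ := hne
      subst e1; subst e2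
      rw [pvGet2_set2_same _ _ _ _ _ (h1 ▸ hr0) (by rw [(h3 _ hr0).1]; exact hc0),
        if_pos hPtrue]
    · rw [pvGet2_set2_ne _ _ _ _ _ _ _ (by omega), h4 r c hr hc, hPnew r c hr hc hne]
  · intro r c hr hc
    rw [hxget r c hr hc]
    by_cases hne : r = n-I ∧ c = p-(J+1)
    · obtain ⟨e1, e2⟩ := hne
      subst e1; subst e2
      rw [if_pos ⟨rfl, rfl⟩, if_pos hPtrue]
    · rw [if_neg hne, h5 r c hr hc, hPnew r c hr hc hne]

theorem pvChoixSet_get (n p I J : Nat) (choix : List (List (Option String)))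
    (v : Option String)
    (hr0 : n - I < n) (hc0 : p - (J+1) < p)
    (h2 : choix.length = n) (h3 : ∀ r, r < n → (choix.getD r []).length = p) :
    ∀ r c, r < n → c < p →
      pvGet2 (pvSet2 choix (n-I) (p-(J+1)) v) r c none =
        (if r = n - I ∧ c = p - (J+1) then v else pvGet2 choix r c none) := by
  intro r c hr hc
  by_cases hne : r = n-I ∧ c = p-(J+1)
  · obtain ⟨e1, e2⟩ := hne
    subst e1; subst e2
    rw [pvGet2_set2_same _ _ _ _ _ (h2 ▸ hr0) (by rw [h3 _ hr0]; exact hc0),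
      if_pos ⟨rfl, rfl⟩]
  · rw [pvGet2_set2_ne _ _ _ _ _ _ _ (by omega), if_neg hne]

theorem pvFill_step (M : List (List Int)) (n p I J : Nat)
    (hI1 : 1 ≤ I) (hIn : I ≤ n) (hJ : J < p) (st)
    (h : pvInvC M n p (pvP n p I J) st) :
    pvInvC M n p (pvP n p I (J+1)) (pvFillCell M n p st I (J+1)) := by
  obtain ⟨cout, choix⟩ := st
  have hcopy := h
  obtain ⟨h1, h2, h3, h4, h5⟩ := hcopy
  have hn1 : 1 ≤ n := hI1.trans hIn
  have hr0 : n - I < n := by omega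
  have hc0 : p - (J+1) < p := by omega
  have hrowlen1 : ∀ r, r < n → (cout.getD r []).length = p := fun r hr => (h3 r hr).1
  have hrowlen2 : ∀ r, r < n → (choix.getD r []).length = p := fun r hr => (h3 r hr).2
  unfold pvFillCell
  dsimp only
  by_cases hI : I = 1 <;> by_cases hJ0 : J = 0
  · -- branch 1: the corner cell (n-1, p-1); only cout is written
    subst hI; subst hJ0
    rw [if_pos ⟨rfl, rfl⟩]
    have hm : (M.getD (n-1) []).getD (p-(0+1)) 0 = pvC M n p (n-1) (p-(0+1)) :=
      (pvC_base M n p _ _ (by omega) (by omega)).symm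
    rw [hm]
    refine pvFill_write M n p 1 0 hI1 hIn hJ cout choix choix h h2 hrowlen2 ?_
    intro r c hr hc
    by_cases hne : r = n-1 ∧ c = p-(0+1)
    · obtain ⟨e1, e2⟩ := hne
      subst e1; subst e2
      rw [if_pos ⟨rfl, rfl⟩, h5 _ _ hr0 hc0,
        if_neg (show ¬(pvP n p 1 0 (n-1) (p-(0+1)) = true) from by simp [pvP] <;> omega)]
      unfold pvChoixSpec
      rw [if_pos ⟨rfl, by omega⟩]
    · rw [if_neg hne]
  · -- branch 2: bottom row (I = 1, J ≥ 1), forced move right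
    subst hI
    rw [if_neg (by omega), if_pos rfl]
    have hread : pvGetC cout (n-1) (p-(J+1)+1) = pvC M n p (n-1) (p-(J+1)+1) := by
      unfold pvGetC
      rw [h4 (n-1) (p-(J+1)+1) hr0 (by omega),
        if_pos (show pvP n p 1 J (n-1) (p-(J+1)+1) = true from by simp [pvP] <;> omega)]
      rfl
    have hval : (M.getD (n-1) []).getD (p-(J+1)) 0 + pvC M n p (n-1) (p-(J+1)+1)
        = pvC M n p (n-1) (p-(J+1)) :=
      (pvC_right M n p _ _ (by omega) (by omega)).symm
    have hstr : (some ">" : Option String) = pvChoixSpec M n p (n-1) (p-(J+1)) := by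
      unfold pvChoixSpec
      rw [if_neg (by omega)]
      try rw [if_pos rfl]
    rw [hread, hval, hstr]
    exact pvFill_write M n p 1 J hI1 hIn hJ cout choix _ h
      (by rw [pvSet2_length]; exact h2)
      (fun r hr => by rw [pvSet2_row_length]; exact hrowlen2 r hr)
      (pvChoixSet_get n p 1 J choix _ hr0 hc0 h2 hrowlen2)
  · -- branch 3: last column (J = 0, I ≥ 2), forced move down
    subst hJ0
    rw [if_neg (by omega), if_neg hI, if_pos rfl]
    have hread : pvGetC cout (n-I+1) (p-(0+1)) = pvC M n p (n-I+1) (p-(0+1)) := by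
      unfold pvGetC
      rw [h4 (n-I+1) (p-(0+1)) (by omega) hc0,
        if_pos (show pvP n p I 0 (n-I+1) (p-(0+1)) = true from by simp [pvP] <;> omega)]
      rfl
    have hval : (M.getD (n-I) []).getD (p-(0+1)) 0 + pvC M n p (n-I+1) (p-(0+1))
        = pvC M n p (n-I) (p-(0+1)) :=
      (pvC_down M n p _ _ (by omega) (by omega)).symm
    have hstr : (some "V" : Option String) = pvChoixSpec M n p (n-I) (p-(0+1)) := by
      unfold pvChoixSpec
      rw [if_neg (by omega)]
      rw [if_neg (by omega)]
      try rw [if_pos (by omega)]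
    rw [hread, hval, hstr]
    exact pvFill_write M n p I 0 hI1 hIn hJ cout choix _ h
      (by rw [pvSet2_length]; exact h2)
      (fun r hr => by rw [pvSet2_row_length]; exact hrowlen2 r hr)
      (pvChoixSet_get n p I 0 choix _ hr0 hc0 h2 hrowlen2)
  · -- branch 4: interior cell (I ≥ 2, J ≥ 1), compare the two neighbours
    rw [if_neg (by omega), if_neg hI, if_neg (by omega)]
    have hreada : pvGetC cout (n-I+1) (p-(J+1)) = pvC M n p (n-I+1) (p-(J+1)) := by
      unfold pvGetC
      rw [h4 (n-I+1) (p-(J+1)) (by omega) hc0,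
        if_pos (show pvP n p I J (n-I+1) (p-(J+1)) = true from by simp [pvP] <;> omega)]
      rfl
    have hreadb : pvGetC cout (n-I) (p-(J+1)+1) = pvC M n p (n-I) (p-(J+1)+1) := by
      unfold pvGetC
      rw [h4 (n-I) (p-(J+1)+1) hr0 (by omega),
        if_pos (show pvP n p I J (n-I) (p-(J+1)+1) = true from by simp [pvP] <;> omega)]
      rfl
    rw [hreada, hreadb]
    have hval : (M.getD (n-I) []).getD (p-(J+1)) 0
          + min (pvC M n p (n-I+1) (p-(J+1))) (pvC M n p (n-I) (p-(J+1)+1))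
        = pvC M n p (n-I) (p-(J+1)) :=
      (pvC_min M n p _ _ (by omega) (by omega)).symm
    have hstr : (some ((if pvC M n p (n-I+1) (p-(J+1)) ≥ pvC M n p (n-I) (p-(J+1)+1)
            then ">" else "")
          ++ (if pvC M n p (n-I+1) (p-(J+1)) < pvC M n p (n-I) (p-(J+1)+1)
            then "V" else "")) : Option String)
        = pvChoixSpec M n p (n-I) (p-(J+1)) := by
      by_cases hab : pvC M n p (n-I+1) (p-(J+1)) ≥ pvC M n p (n-I) (p-(J+1)+1)
      · rw [if_pos hab, if_neg (show ¬(pvC M n p (n-I+1) (p-(J+1)) < pvC M n p (n-I) (p-(J+1)+1)) by omega)]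
        unfold pvChoixSpec
        rw [if_neg (by omega), if_neg (by omega), if_neg (by omega), if_pos hab]
        rfl
      · rw [if_neg hab, if_pos (show pvC M n p (n-I+1) (p-(J+1)) < pvC M n p (n-I) (p-(J+1)+1) by omega)]
        unfold pvChoixSpec
        rw [if_neg (by omega), if_neg (by omega), if_neg (by omega), if_neg hab]
        rfl
    rw [hval, hstr]
    exact pvFill_write M n p I J hI1 hIn hJ cout choix _ h
      (by rw [pvSet2_length]; exact h2)
      (fun r hr => by rw [pvSet2_row_length]; exact hrowlen2 r hr)
      (pvChoixSet_get n p I J choix _ hr0 hc0 h2 hrowlen2)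

theorem pvFill_inner (M : List (List Int)) (n p I : Nat)
    (hI1 : 1 ≤ I) (hIn : I ≤ n) (st) (h : pvInvC M n p (pvP n p I 0) st) :
    ∀ J ≤ p, pvInvC M n p (pvP n p I J)
      ((((List.range J).map (· + 1))).foldl (fun st j => pvFillCell M n p st I j) st) := by
  intro J
  induction J with
  | zero => intro _; simpa using h
  | succ J ih =>
    intro hJ
    rw [List.range_succ, List.map_append, List.foldl_append]
    exact pvFill_step M n p I J hI1 hIn (by omega) _ (ih (by omega))

theorem pvFill_outer (M : List (List Int)) (n p : Nat) :
    ∀ I ≤ n, pvInvC M n p (fun r _ => decide (n - I ≤ r))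
      ((((List.range I).map (· + 1))).foldl
        (fun st i => ((List.range p).map (· + 1)).foldl (fun st j => pvFillCell M n p st i j) st)
        (List.replicate n (List.replicate p (none : Option Int)),
         List.replicate n (List.replicate p (none : Option String)))) := by
  intro I
  induction I with
  | zero =>
    intro _
    simp only [List.range_zero, List.map_nil, List.foldl_nil]
    have hrow : ∀ {β : Type} (r : Nat) (x : List β), r < n →
        ((List.replicate n x).getD r []) = x := by
      intro β r x hr
      rw [List.getD_eq_getElem?_getD, List.getElem?_replicate]
      simp [hr]
    refine ⟨by simp, by simp, ?_, ?_, ?_⟩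
    · intro r hr
      rw [hrow r _ hr, hrow r _ hr]
      simp
    · intro r c hr hc
      rw [if_neg (show ¬((fun r _ => decide (n - 0 ≤ r)) r c = true) from by simp; omega)]
      unfold pvGet2
      rw [hrow r _ hr]
      rw [List.getD_eq_getElem?_getD, List.getElem?_replicate]
      by_cases h : c < p <;> simp [h]
    · intro r c hr hc
      rw [if_neg (show ¬((fun r _ => decide (n - 0 ≤ r)) r c = true) from by simp; omega)]
      unfold pvGet2
      rw [hrow r _ hr]
      rw [List.getD_eq_getElem?_getD, List.getElem?_replicate]
      by_cases h : c < p <;> simp [h]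
  | succ I ih =>
    intro hI
    rw [List.range_succ, List.map_append, List.foldl_append, List.map_cons,
      List.foldl_cons, List.map_nil, List.foldl_nil]
    have hstart : pvInvC M n p (pvP n p (I+1) 0)
        ((((List.range I).map (· + 1))).foldl
          (fun st i => ((List.range p).map (· + 1)).foldl (fun st j => pvFillCell M n p st i j) st)
          (List.replicate n (List.replicate p (none : Option Int)),
           List.replicate n (List.replicate p (none : Option String)))) := by
      refine pvInvC_congr M n p _ _ _ ?_ (ih (by omega))
      intro r c hr hc
      simp only [pvP, ← Bool.decide_and, ← Bool.decide_or]
      exact decide_eq_decide.mpr (by omega)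
    have hend := pvFill_inner M n p (I+1) (by omega) hI _ hstart p le_rfl
    refine pvInvC_congr M n p _ _ _ ?_ hend
    intro r c hr hc
    simp only [pvP, ← Bool.decide_and, ← Bool.decide_or]
    exact decide_eq_decide.mpr (by omega)

-- characterization of A's choice table ----------------------------------------

theorem pvChoix_char (M : List (List Int)) :
    ∀ r c, r < M.length → c < (M.getD 0 []).length →
      pvGet2 (construire_tableaux M).2.2 r c none
        = pvChoixSpec M M.length (M.getD 0 []).length r c := by
  intro r c hr hc
  have h := pvFill_outer M M.length (M.getD 0 []).length M.length le_rfl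
  obtain ⟨-, -, -, -, h5⟩ := h
  have := h5 r c hr hc
  simp only [construire_tableaux]
  rw [this]
  simp

-- A's walk produces pvPath ----------------------------------------------------

theorem pvWalkA_path (M : List (List Int)) (n p : Nat)
    (choix : List (List (Option String)))
    (hchoix : ∀ r c, r < n → c < p → pvGet2 choix r c none = pvChoixSpec M n p r c)
    (hn : 1 ≤ n) (hp : 1 ≤ p) :
    ∀ f i j, i < n → j < p → (n - 1 - i) + (p - 1 - j) < f →
      pvWalkA choix f i j ++ [((n : Int) - 1, (p : Int) - 1)] = pvPath M n p i j := by
  intro f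
  induction f with
  | zero => intro i j hi hj hf; omega
  | succ f ih =>
    intro i j hi hj hf
    rw [pvWalkA, hchoix i j hi hj]
    unfold pvChoixSpec
    by_cases hie : i = n-1 <;> by_cases hje : j = p-1
    · rw [if_pos ⟨hie, hje⟩]
      rw [pvPath_base M n p i j (by omega) (by omega)]
      have e1 : (i : Int) = (n : Int) - 1 := by omega
      have e2 : (j : Int) = (p : Int) - 1 := by omega
      simp [e1, e2]
    · rw [if_neg (by tauto), if_pos hie]
      dsimp only
      rw [if_pos (show (">" : String) = ">" from rfl)]
      rw [List.cons_append, ih i (j+1) hi (by omega) (by omega),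
        pvPath_rightF M n p i j (by omega) (by omega)]
    · rw [if_neg (by tauto), if_neg hie, if_pos hje]
      dsimp only
      rw [if_neg (by decide : ¬("V" : String) = ">")]
      rw [List.cons_append, ih (i+1) j (by omega) hj (by omega),
        pvPath_downF M n p i j (by omega) (by omega)]
    · rw [if_neg (by tauto), if_neg hie, if_neg hje]
      rw [pvPath_cmp M n p i j (by omega) (by omega)]
      by_cases hab : pvC M n p (i+1) j ≥ pvC M n p i (j+1)
      · rw [if_pos hab, if_pos hab]
        dsimp only
        rw [if_pos (show (">" : String) = ">" from rfl)]
        rw [List.cons_append, ih i (j+1) hi (by omega) (by omega)]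
      · rw [if_neg hab, if_neg hab]
        dsimp only
        rw [if_neg (by decide : ¬("V" : String) = ">")]
        rw [List.cons_append, ih (i+1) j (by omega) hj (by omega)]

-- B's column computes the entries pvEnt ---------------------------------------

theorem pvGetD_map_range {α : Type} (f : Nat → α) (p j : Nat) (d : α) (h : j < p) :
    ((List.range p).map f).getD j d = f j := by
  rw [List.getD_eq_getElem?_getD]
  simp [List.getElem?_map, List.getElem?_range h]

theorem pvColB_last (M : List (List Int)) (n p : Nat) (hp : 1 ≤ p) :
    ∀ k ≤ n, pvColB M n p (p-1) none k
      = (List.range' (n-k) k).map (fun i => pvEnt M n p i (p-1)) := by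
  intro k
  induction k with
  | zero => intro _; rfl
  | succ k ih =>
    intro hk
    rw [pvColB.eq_def]
    dsimp only
    rw [ih (by omega)]
    cases k with
    | zero =>
      rw [Nat.sub_zero, List.range'_zero, List.map_nil, List.range'_one, List.map_cons,
        List.map_nil]
      dsimp only
      simp only [pvEnt]
      rw [pvC_base M n p _ _ (by omega) (by omega),
        pvPath_base M n p _ _ (by omega) (by omega)]
    | succ k' =>
      have hr2 : List.range' (n-(k'+1)) (k'+1) = (n-(k'+1)) :: List.range' (n-k') k' := by
        rw [List.range'_succ, (by omega : n - (k'+1) + 1 = n - k')]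
      rw [hr2, List.map_cons]
      simp only [pvEnt]
      have hrange : List.range' (n-(k'+1+1)) (k'+1+1)
          = (n-(k'+1+1)) :: List.range' (n-(k'+1)) (k'+1) := by
        rw [List.range'_succ, (by omega : n - (k'+1+1) + 1 = n - (k'+1))]
      rw [hrange, hr2, List.map_cons, List.map_cons]
      rw [pvC_down M n p (n-(k'+1+1)) (p-1) (by omega) (by omega),
        pvPath_downF M n p (n-(k'+1+1)) (p-1) (by omega) (by omega),
        (by omega : n - (k'+1+1) + 1 = n - (k'+1))]

theorem pvColB_mid (M : List (List Int)) (n p j : Nat) (hj : j + 1 < p) :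
    ∀ k ≤ n, pvColB M n p j (some ((List.range n).map (fun i => pvEnt M n p i (j+1)))) k
      = (List.range' (n-k) k).map (fun i => pvEnt M n p i j) := by
  intro k
  induction k with
  | zero => intro _; rfl
  | succ k ih =>
    intro hk
    have hpr : ∀ i, i < n →
        ((List.range n).map (fun i => pvEnt M n p i (j+1))).getD i (0, [])
          = pvEnt M n p i (j+1) := fun i hi => pvGetD_map_range _ _ _ _ hi
    rw [pvColB.eq_def]
    dsimp only
    rw [ih (by omega)]
    cases k with
    | zero =>
      rw [Nat.sub_zero, List.range'_zero, List.map_nil, List.range'_one, List.map_cons,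
        List.map_nil]
      dsimp only
      rw [hpr _ (by omega)]
      simp only [pvEnt]
      rw [pvC_right M n p _ _ (by omega) hj, pvPath_rightF M n p _ _ (by omega) hj]
    | succ k' =>
      have hr2 : List.range' (n-(k'+1)) (k'+1) = (n-(k'+1)) :: List.range' (n-k') k' := by
        rw [List.range'_succ, (by omega : n - (k'+1) + 1 = n - k')]
      rw [hr2, List.map_cons]
      simp only [pvEnt] at hpr ⊢
      rw [hpr _ (by omega)]
      have hrange : List.range' (n-(k'+1+1)) (k'+1+1)
          = (n-(k'+1+1)) :: List.range' (n-(k'+1)) (k'+1) := by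
        rw [List.range'_succ, (by omega : n - (k'+1+1) + 1 = n - (k'+1))]
      rw [hrange, hr2, List.map_cons, List.map_cons]
      have h1n : n - (k'+1+1) + 1 < n := by omega
      rw [pvC_min M n p (n-(k'+1+1)) j h1n hj, pvPath_cmp M n p (n-(k'+1+1)) j h1n hj,
        (by omega : n - (k'+1+1) + 1 = n - (k'+1))]
      by_cases hab : pvC M n p (n-(k'+1)) j ≥ pvC M n p (n-(k'+1+1)) (j+1)
      · rw [if_pos hab, if_pos hab, min_eq_right (by omega)]
      · rw [if_neg hab, if_neg hab, min_eq_left (by omega)]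

-- B's outer fold over the columns ---------------------------------------------

theorem pvFoldCols (M : List (List Int)) (n p : Nat) :
    ∀ t, 1 ≤ t → t ≤ p →
      ((List.range' (p-t) t).reverse).foldl
        (fun prev j => some (pvColB M n p j prev n))
        (none : Option (List (Int × List (Int × Int))))
      = some ((List.range n).map (fun i => pvEnt M n p i (p-t))) := by
  intro t
  induction t with
  | zero => intro h _; omega
  | succ t ih =>
    intro _ ht
    cases t with
    | zero =>
      rw [List.range'_one, List.reverse_cons, List.reverse_nil, List.nil_append,
        List.foldl_cons, List.foldl_nil]
      have h := pvColB_last M n p (by omega) n le_rfl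
      rw [Nat.sub_self, ← List.range_eq_range'] at h
      rw [h]
    | succ t' =>
      have hrange : List.range' (p-(t'+1+1)) (t'+1+1)
          = (p-(t'+1+1)) :: List.range' (p-(t'+1)) (t'+1) := by
        have h1 : p - (t'+1+1) + 1 = p - (t'+1) := by omega
        rw [List.range'_succ, h1]
      rw [hrange, List.reverse_cons, List.foldl_append, ih (by omega) (by omega),
        List.foldl_cons, List.foldl_nil]
      have hj : p - (t'+1+1) + 1 < p := by omega
      have h := pvColB_mid M n p (p-(t'+1+1)) hj n le_rfl
      have e1 : p - (t'+1+1) + 1 = p - (t'+1) := by omega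
      rw [e1] at h
      rw [Nat.sub_self, ← List.range_eq_range'] at h
      rw [h]

theorem pvFlatten_id : ∀ l : List (Int × Int), pvFlatten l = l := by
  intro l
  induction l with
  | nil => rfl
  | cons x r ih => rw [pvFlatten, ih]

-- ===== VERDICT (by name: the statement is the Claim_ definition above) =====
theorem reconstruction_chemin_spec : Claim_equal_reconstruction_chemin := by
  unfold Claim_equal_reconstruction_chemin
  intro M _ hpre
  obtain ⟨hne, hp0, -⟩ := hpre
  have hn : 0 < M.length := List.length_pos_iff.mpr hne
  have hp : 0 < (M.getD 0 []).length := Nat.pos_of_ne_zero hp0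
  unfold Spec_reconstruction_chemin
  simp only [reconstruction_chemin, reconstruction_chemin_alt]
  have hA := pvWalkA_path M M.length (M.getD 0 []).length (construire_tableaux M).2.2
    (pvChoix_char M) hn hp (M.length + (M.getD 0 []).length) 0 0 hn hp (by omega)
  rw [hA]
  have hB := pvFoldCols M M.length (M.getD 0 []).length (M.getD 0 []).length hp le_rfl
  rw [Nat.sub_self, ← List.range_eq_range'] at hB
  rw [hB]
  simp only [Option.getD_some]
  rw [pvGetD_map_range _ _ _ _ hn, pvFlatten_id]
  rfl
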